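-- pv_equiv track=rewrite | github.com/apampuch/Savage-Roller | die_roller.py | split_roll_string
-- ===== SOURCE A (Python) =====
-- from collections import Counter
-- from typing import Dict, List, Union
--
-- def split_roll_string(roll_string: str) -> List[str]:
--     # validate the string
--     count = Counter(roll_string)
--     # make sure we only have one of d, s, e, n
--     number_of_roll_types = len(set(count) & set('dsen'))
--     if number_of_roll_types > 1:
--         raise ValueError('Cannot mix roll types!')
--     for op in {'s', 'e', 'n', 't', 'c'}:
--         if count[op] > 1:
--             raise ValueError(f'Too many "{op}" operators! (Can only have one.)')
--
--     splitters = {'d', 's', 'e', 'w', 'n', 't', 'c', '+', '-'}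
--
--     parts = []
--     buffer = ''
--
--     for c in roll_string:
--         if c in splitters:
--             if buffer:
--                 parts.append(buffer)
--                 buffer = ''
--             parts.append(c)
--         else:
--             buffer += c
--     if buffer:
--         parts.append(buffer)
--
--     return parts
-- ===== SOURCE B (Python) =====
-- from collections import Counter
--
-- SPLITTERS = set('dsewntc+-')
--
--
-- def _tokens(s):
--     # run decomposition: each splitter is its own token, each maximal
--     # non-splitter run is one token, emitted directly by jumping run to run
--     tokens = []
--     i = 0
--     n = len(s)
--     while i < n:
--         if s[i] in SPLITTERS:
--             tokens.append(s[i])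
--             i += 1
--         else:
--             j = i + 1
--             while j < n and s[j] not in SPLITTERS:
--                 j += 1
--             tokens.append(s[i:j])
--             i = j
--     return tokens
--
--
-- def split_roll_string(roll_string):
--     # validate the string (kept as in the original so exceptions match)
--     count = Counter(roll_string)
--     number_of_roll_types = len(set(count) & set('dsen'))
--     if number_of_roll_types > 1:
--         raise ValueError('Cannot mix roll types!')
--     for op in {'s', 'e', 'n', 't', 'c'}:
--         if count[op] > 1:
--             raise ValueError(f'Too many "{op}" operators! (Can only have one.)')
--     return _tokens(roll_string)
-- ===== Notes on version B (the rewrite author's own statement) =====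
-- stated objective: alternative
-- what changed: The stateful buffer-accumulating scan is replaced by a recursive run decomposition that emits each splitter and each maximal non-splitter run as a token directly; validation is kept verbatim so exceptions match.
import Mathlib
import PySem

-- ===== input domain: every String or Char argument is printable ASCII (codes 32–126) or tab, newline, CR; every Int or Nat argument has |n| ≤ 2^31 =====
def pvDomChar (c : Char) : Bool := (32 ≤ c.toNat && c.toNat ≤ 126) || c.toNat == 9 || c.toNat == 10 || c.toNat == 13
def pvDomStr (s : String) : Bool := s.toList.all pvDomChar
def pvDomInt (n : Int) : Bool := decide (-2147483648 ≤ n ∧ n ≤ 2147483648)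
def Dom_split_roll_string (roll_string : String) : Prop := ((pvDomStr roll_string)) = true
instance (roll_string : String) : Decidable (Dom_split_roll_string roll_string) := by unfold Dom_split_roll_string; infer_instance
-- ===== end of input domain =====

-- B replaces A's stateful buffer-accumulating tokenization loop by a recursive run
-- decomposition (alternative structure, same cost); the validation block is kept verbatim.

-- shared by both Pythons: the splitter set {'d','s','e','w','n','t','c','+','-'}
def pvIsSplit (c : Char) : Bool := c ∈ (['d', 's', 'e', 'w', 'n', 't', 'c', '+', '-'] : List Char)

-- the loop body of A's for-loop (one step of the buffer-accumulating scan)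
def pvStepA (st : List String × List Char) (c : Char) : List String × List Char :=
  if pvIsSplit c then
    if st.2 = [] then (st.1 ++ [String.ofList [c]], [])
    else (st.1 ++ [String.ofList st.2, String.ofList [c]], [])
  else (st.1, st.2 ++ [c])

-- ===== PORT A =====
def split_roll_string (roll_string : String) : List String :=
  let cs := roll_string.toList
  -- count = Counter(roll_string)
  let count := PySem.Dict.counter cs
  -- number_of_roll_types = len(set(count) & set('dsen'))
  let number_of_roll_types :=
    PySem.Set.len (PySem.Set.inter (PySem.Set.ofList count.keys) (PySem.Set.ofList "dsen".toList))
  if 1 < number_of_roll_types then []      -- raise ValueError('Cannot mix roll types!')  (outside Pre_)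
  else if (['s', 'e', 'n', 't', 'c'] : List Char).any (fun op => 1 < count.getD op 0) then []
    -- raise ValueError('Too many …')  (outside Pre_)
  else
    -- the buffer-accumulating loop; buffer is the string's chars as List Char
    let fin := cs.foldl pvStepA ([], [])
    if fin.2 = [] then fin.1 else fin.1 ++ [String.ofList fin.2]

-- ===== PORT B =====
-- B's while-loop over the remaining suffix is ported as structural recursion on that
-- suffix; the inner index scan and the slices s[i:j], s[j:] are exactly
-- takeWhile/dropWhile of the non-splitter predicate (j = next splitter index).
def pvTokens : List Char → List String
  | [] => []
  | c :: rest =>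
    if pvIsSplit c then String.ofList [c] :: pvTokens rest
    else
      String.ofList (c :: rest.takeWhile (fun x => !pvIsSplit x)) ::
        pvTokens (rest.dropWhile (fun x => !pvIsSplit x))
termination_by cs => cs.length
decreasing_by
  · simp
  · have := List.length_dropWhile_le (fun x => !pvIsSplit x) rest
    simp only [List.length_cons]; omega

def split_roll_string_alt (roll_string : String) : List String :=
  let cs := roll_string.toList
  -- validation kept verbatim from A
  let count := PySem.Dict.counter cs
  let number_of_roll_types :=
    PySem.Set.len (PySem.Set.inter (PySem.Set.ofList count.keys) (PySem.Set.ofList "dsen".toList))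
  if 1 < number_of_roll_types then []      -- raise ValueError  (outside Pre_)
  else if (['s', 'e', 'n', 't', 'c'] : List Char).any (fun op => 1 < count.getD op 0) then []
    -- raise ValueError  (outside Pre_)
  else pvTokens cs

-- ===== PRECONDITION & SPEC =====
-- Pre_ excludes exactly the inputs on which A raises ValueError: more than one distinct
-- roll-type character among 'd','s','e','n', or more than one occurrence of one of
-- 's','e','n','t','c'.
def Pre_split_roll_string (roll_string : String) : Prop :=
  (['d', 's', 'e', 'n'] : List Char).countP (fun c => c ∈ roll_string.toList) ≤ 1 ∧
    roll_string.toList.count 's' ≤ 1 ∧ roll_string.toList.count 'e' ≤ 1 ∧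
    roll_string.toList.count 'n' ≤ 1 ∧ roll_string.toList.count 't' ≤ 1 ∧
    roll_string.toList.count 'c' ≤ 1
instance (roll_string : String) : Decidable (Pre_split_roll_string roll_string) := by
  unfold Pre_split_roll_string; infer_instance

def pvWitness_split_roll_string : String := "3d6+2"

def Spec_split_roll_string (roll_string : String) (out : List String) : Prop := out = split_roll_string_alt roll_string
instance (roll_string : String) (out : List String) : Decidable (Spec_split_roll_string roll_string out) := by unfold Spec_split_roll_string; infer_instance

-- ===== CLAIM (what is proved, stated in full; the proofs are below) =====
def Claim_equal_split_roll_string : Prop := ∀ (roll_string : String), Dom_split_roll_string roll_string → Pre_split_roll_string roll_string → Spec_split_roll_string roll_string (split_roll_string roll_string)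

-- ===== LEMMAS AND PROOFS =====

-- unfolding pvTokens by the leading non-splitter run
lemma pvTokens_run (cs : List Char) :
    pvTokens cs =
      (if cs.takeWhile (fun x => !pvIsSplit x) = [] then []
        else [String.ofList (cs.takeWhile (fun x => !pvIsSplit x))]) ++
        pvTokens (cs.dropWhile (fun x => !pvIsSplit x)) := by
  cases cs with
  | nil => simp [pvTokens]
  | cons c rest =>
    by_cases h : pvIsSplit c
    · simp [pvTokens, h, List.takeWhile, List.dropWhile]
    · simp [pvTokens, h, List.takeWhile, List.dropWhile]

-- A's buffer loop, run from an arbitrary state, produces the already emitted parts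
-- followed by the pending run (buffer ++ leading non-splitter run) and B's tokens of the rest.
lemma loopA_eq (cs : List Char) (parts : List String) (buf : List Char) :
    (if (cs.foldl pvStepA (parts, buf)).2 = [] then (cs.foldl pvStepA (parts, buf)).1
      else (cs.foldl pvStepA (parts, buf)).1 ++ [String.ofList (cs.foldl pvStepA (parts, buf)).2])
    = parts ++
      ((if buf ++ cs.takeWhile (fun x => !pvIsSplit x) = [] then []
          else [String.ofList (buf ++ cs.takeWhile (fun x => !pvIsSplit x))]) ++
        pvTokens (cs.dropWhile (fun x => !pvIsSplit x))) := by
  induction cs generalizing parts buf with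
  | nil =>
    by_cases hb : buf = [] <;> simp [hb, pvTokens]
  | cons c rest ih =>
    by_cases h : pvIsSplit c
    · by_cases hb : buf = []
      · simp only [List.foldl_cons, pvStepA, h, hb, ite_true]
        rw [ih]
        simp [List.takeWhile, List.dropWhile, h, pvTokens, pvTokens_run rest]
      · simp only [List.foldl_cons, pvStepA, h, ite_true, if_neg hb]
        rw [ih]
        simp [List.takeWhile, List.dropWhile, h, hb, pvTokens, pvTokens_run rest]
    · simp only [List.foldl_cons, pvStepA, h, Bool.false_eq_true, ite_false]
      rw [ih]
      simp [List.takeWhile, List.dropWhile, h]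

-- ===== VERDICT (by name: the statement is the Claim_ definition above) =====
theorem split_roll_string_spec : Claim_equal_split_roll_string := by
  intro s _ _
  unfold Spec_split_roll_string
  simp only [split_roll_string, split_roll_string_alt]
  split_ifs with h1 h2 h3
  · rfl
  · rfl
  · have key := loopA_eq s.toList [] []
    rw [if_pos h3] at key
    rw [key, pvTokens_run s.toList]
    simp
  · have key := loopA_eq s.toList [] []
    rw [if_neg h3] at key
    rw [key, pvTokens_run s.toList]
    simp
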